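-- pv_equiv track=rewrite | github.com/javad-amin/advent-of-code | src/day_03.py | find_number_and_y_indices
-- ===== SOURCE A (Python) =====
-- def find_number_and_y_indices(line, y):
--     def expand_in_direction(start, step):
--         part_number = ""
--         indices = []
--         while 0 <= start < len(line) and line[start].isdigit():
--             part_number += line[start]
--             indices.append(start)
--             start += step
--         return part_number, indices
--
--     left_part_number, left_indices = expand_in_direction(y, -1)
--     right_part_number, right_indices = expand_in_direction(y + 1, 1)
--
--     part_number = left_part_number[::-1] + right_part_number
--     y_indices = left_indices[::-1] + right_indices
--
--     return part_number, y_indices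
-- ===== SOURCE B (Python) =====
-- def find_number_and_y_indices(line, y):
--     i = y
--     while 0 <= i < len(line) and line[i].isdigit():
--         i -= 1
--     lo = i + 1
--     j = y + 1
--     while 0 <= j < len(line) and line[j].isdigit():
--         j += 1
--     return line[lo:j], list(range(lo, j))
-- ===== Notes on version B (the rewrite author's own statement) =====
-- stated objective: simpler
-- what changed: Instead of accumulating characters and indices in two directional loops and reversing the left parts, B only scans for the run's boundary indices lo and j and produces the result with one slice line[lo:j] and one range(lo, j).
import Mathlib
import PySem

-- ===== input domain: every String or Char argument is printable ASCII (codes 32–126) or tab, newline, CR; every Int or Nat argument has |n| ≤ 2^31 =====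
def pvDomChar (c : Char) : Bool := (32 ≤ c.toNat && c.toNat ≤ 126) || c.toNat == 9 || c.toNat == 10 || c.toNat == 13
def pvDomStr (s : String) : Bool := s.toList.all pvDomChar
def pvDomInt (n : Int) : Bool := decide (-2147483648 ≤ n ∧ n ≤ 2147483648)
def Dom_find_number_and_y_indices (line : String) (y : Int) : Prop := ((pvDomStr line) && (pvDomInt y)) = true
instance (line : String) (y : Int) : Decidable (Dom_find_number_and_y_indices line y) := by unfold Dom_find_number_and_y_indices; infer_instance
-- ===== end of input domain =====

-- B replaces A's two character/index accumulation loops plus reversal by two boundary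
-- scans and a single slice line[lo:j] with list(range(lo, j)) (objective: simpler).

-- ===== PORT A =====
-- A's nested helper expand_in_direction, transliterated once per call site
-- (the closure is only ever invoked with step = -1 and step = 1).
-- line[start] is exact here: the guard ensures 0 ≤ start < len(line).
def pvExpandLeft (cs : List Char) (start : Int) : List Char × List Int :=
  if h : 0 ≤ start ∧ start < cs.length ∧ PySem.Chars.isdigit (PySem.List.pyGetD cs start ' ') then
    let rest := pvExpandLeft cs (start - 1)
    (PySem.List.pyGetD cs start ' ' :: rest.1, start :: rest.2)
  else ([], [])
termination_by (start + 1).toNat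
decreasing_by omega

def pvExpandRight (cs : List Char) (start : Int) : List Char × List Int :=
  if h : 0 ≤ start ∧ start < cs.length ∧ PySem.Chars.isdigit (PySem.List.pyGetD cs start ' ') then
    let rest := pvExpandRight cs (start + 1)
    (PySem.List.pyGetD cs start ' ' :: rest.1, start :: rest.2)
  else ([], [])
termination_by ((cs.length : Int) - start).toNat
decreasing_by omega

def find_number_and_y_indices (line : String) (y : Int) : String × List Int :=
  let cs := line.toList
  let left := pvExpandLeft cs y
  let right := pvExpandRight cs (y + 1)
  -- [::-1] on a string/list is reversal (PySem.List.slice?_none_none_neg_one)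
  (String.ofList (left.1.reverse ++ right.1), left.2.reverse ++ right.2)

-- ===== PORT B =====
def pvLeftBound (cs : List Char) (i : Int) : Int :=
  if h : 0 ≤ i ∧ i < cs.length ∧ PySem.Chars.isdigit (PySem.List.pyGetD cs i ' ') then
    pvLeftBound cs (i - 1)
  else i
termination_by (i + 1).toNat
decreasing_by omega

def pvRightBound (cs : List Char) (j : Int) : Int :=
  if h : 0 ≤ j ∧ j < cs.length ∧ PySem.Chars.isdigit (PySem.List.pyGetD cs j ' ') then
    pvRightBound cs (j + 1)
  else j
termination_by ((cs.length : Int) - j).toNat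
decreasing_by omega

def find_number_and_y_indices_alt (line : String) (y : Int) : String × List Int :=
  let cs := line.toList
  let lo := pvLeftBound cs y + 1
  let j := pvRightBound cs (y + 1)
  (String.ofList (PySem.List.slice cs (some lo) (some j)), PySem.List.pyRange lo j 1)

-- ===== PRECONDITION & SPEC =====
def Spec_find_number_and_y_indices (line : String) (y : Int) (out : String × List Int) : Prop := out = find_number_and_y_indices_alt line y
instance (line : String) (y : Int) (out : String × List Int) : Decidable (Spec_find_number_and_y_indices line y out) := by unfold Spec_find_number_and_y_indices; infer_instance

-- ===== CLAIM (what is proved, stated in full; the proofs are below) =====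
def Claim_equal_find_number_and_y_indices : Prop := ∀ (line : String) (y : Int), Dom_find_number_and_y_indices line y → Spec_find_number_and_y_indices line y (find_number_and_y_indices line y)

-- ===== LEMMAS AND PROOFS =====

theorem pvLeftBound_le (cs : List Char) (i : Int) : pvLeftBound cs i ≤ i := by
  unfold pvLeftBound
  split
  · have := pvLeftBound_le cs (i - 1); omega
  · omega
termination_by (i + 1).toNat
decreasing_by omega

theorem pvLeftBound_ge (cs : List Char) (i : Int) (h : -1 ≤ i) : -1 ≤ pvLeftBound cs i := by
  unfold pvLeftBound
  split
  · exact pvLeftBound_ge cs (i - 1) (by omega)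
  · omega
termination_by (i + 1).toNat
decreasing_by omega

theorem pvRightBound_ge (cs : List Char) (j : Int) : j ≤ pvRightBound cs j := by
  unfold pvRightBound
  split
  · have := pvRightBound_ge cs (j + 1); omega
  · omega
termination_by ((cs.length : Int) - j).toNat
decreasing_by omega

theorem pvRightBound_le (cs : List Char) (j : Int) (h : j ≤ (cs.length : Int)) :
    pvRightBound cs j ≤ (cs.length : Int) := by
  unfold pvRightBound
  split
  · exact pvRightBound_le cs (j + 1) (by omega)
  · omega
termination_by ((cs.length : Int) - j).toNat
decreasing_by omega

-- slice with both bounds equal is empty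
theorem slice_self' (cs : List Char) (a : Int) : PySem.List.slice cs (some a) (some a) = [] := by
  have h := PySem.List.length_slice cs a a
  exact List.eq_nil_of_length_eq_zero (by omega)

-- appending one in-range element on the right of a slice
theorem slice_snoc (cs : List Char) (a s : Int) (h0 : 0 ≤ a) (has : a ≤ s)
    (hs : s < (cs.length : Int)) :
    PySem.List.slice cs (some a) (some (s + 1)) =
      PySem.List.slice cs (some a) (some s) ++ [cs[s.toNat]'(by omega)] := by
  rw [PySem.List.slice_toNat cs h0 (by omega), PySem.List.slice_toNat cs h0 (by omega)]
  have hst : (s + 1).toNat = s.toNat + 1 := by omega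
  have hlt : s.toNat - a.toNat < (cs.drop a.toNat).length := by
    simp [List.length_drop]; omega
  rw [hst]
  rw [show s.toNat + 1 - a.toNat = (s.toNat - a.toNat) + 1 by omega]
  rw [List.take_add_one]
  congr 1
  simp [List.getElem?_drop]
  rw [List.getElem?_eq_getElem (by omega)]
  simp
  congr 1
  omega

-- prepending one in-range element on the left of a slice
theorem slice_cons (cs : List Char) (j b : Int) (h0 : 0 ≤ j) (hj : j < (cs.length : Int))
    (hb : j + 1 ≤ b) :
    PySem.List.slice cs (some j) (some b) =
      cs[j.toNat]'(by omega) :: PySem.List.slice cs (some (j + 1)) (some b) := by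
  rw [PySem.List.slice_toNat cs h0 (by omega), PySem.List.slice_toNat cs (show (0:Int) ≤ j + 1 by omega) (by omega)]
  have hdrop : cs.drop j.toNat = cs[j.toNat]'(by omega) :: cs.drop (j.toNat + 1) := by
    exact List.drop_eq_getElem_cons (by omega)
  rw [hdrop]
  have h1 : (j + 1).toNat = j.toNat + 1 := by omega
  rw [h1]
  have h2 : b.toNat - j.toNat = (b.toNat - (j.toNat + 1)) + 1 := by omega
  rw [h2, List.take_succ_cons]

-- main characterisation of A's right scan
theorem expandRight_spec (cs : List Char) (j : Int) :
    pvExpandRight cs j = (PySem.List.slice cs (some j) (some (pvRightBound cs j)),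
      PySem.List.pyRange j (pvRightBound cs j) 1) := by
  by_cases h : 0 ≤ j ∧ j < (cs.length : Int) ∧ PySem.Chars.isdigit (PySem.List.pyGetD cs j ' ') = true
  · obtain ⟨h0, hlen, hdig⟩ := h
    have hE : pvExpandRight cs j =
        (PySem.List.pyGetD cs j ' ' :: (pvExpandRight cs (j + 1)).1,
          j :: (pvExpandRight cs (j + 1)).2) := by
      rw [pvExpandRight]; rw [dif_pos ⟨h0, hlen, hdig⟩]
    have hB : pvRightBound cs j = pvRightBound cs (j + 1) := by
      rw [pvRightBound]; rw [dif_pos ⟨h0, hlen, hdig⟩]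
    have ih := expandRight_spec cs (j + 1)
    have hge := pvRightBound_ge cs (j + 1)
    have hgetD : PySem.List.pyGetD cs j ' ' = cs[j.toNat]'(by omega) :=
      PySem.List.pyGetD_eq_getElem cs ' ' h0 hlen
    rw [hE, hB, ih]
    refine Prod.ext ?_ ?_
    · simp only
      rw [slice_cons cs j (pvRightBound cs (j + 1)) h0 hlen (by omega), hgetD]
    · simp only
      exact (PySem.List.pyRange_one_cons (by omega)).symm
  · have hE : pvExpandRight cs j = ([], []) := by
      rw [pvExpandRight]; rw [dif_neg h]
    have hB : pvRightBound cs j = j := by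
      rw [pvRightBound]; rw [dif_neg h]
    rw [hE, hB]
    exact Prod.ext (by simp [slice_self']) (by simp [PySem.List.pyRange_one_eq_nil (le_refl j)])
termination_by ((cs.length : Int) - j).toNat
decreasing_by omega

-- main characterisation of A's left scan (reversed)
theorem expandLeft_spec (cs : List Char) (s : Int) (_hs : -1 ≤ s) :
    (pvExpandLeft cs s).1.reverse = PySem.List.slice cs (some (pvLeftBound cs s + 1)) (some (s + 1)) ∧
    (pvExpandLeft cs s).2.reverse = PySem.List.pyRange (pvLeftBound cs s + 1) (s + 1) 1 := by
  by_cases h : 0 ≤ s ∧ s < (cs.length : Int) ∧ PySem.Chars.isdigit (PySem.List.pyGetD cs s ' ') = true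
  · obtain ⟨h0, hlen, hdig⟩ := h
    have hE : pvExpandLeft cs s =
        (PySem.List.pyGetD cs s ' ' :: (pvExpandLeft cs (s - 1)).1,
          s :: (pvExpandLeft cs (s - 1)).2) := by
      rw [pvExpandLeft]; rw [dif_pos ⟨h0, hlen, hdig⟩]
    have hB : pvLeftBound cs s = pvLeftBound cs (s - 1) := by
      rw [pvLeftBound]; rw [dif_pos ⟨h0, hlen, hdig⟩]
    have ih := expandLeft_spec cs (s - 1) (by omega)
    have hle := pvLeftBound_le cs (s - 1)
    have hgeb := pvLeftBound_ge cs (s - 1) (by omega)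
    have hgetD : PySem.List.pyGetD cs s ' ' = cs[s.toNat]'(by omega) :=
      PySem.List.pyGetD_eq_getElem cs ' ' h0 hlen
    have ih1 := ih.1
    have ih2 := ih.2
    rw [show s - 1 + 1 = s by ring] at ih1 ih2
    rw [hE, hB]
    constructor
    · simp only [List.reverse_cons]
      rw [ih1]
      rw [slice_snoc cs (pvLeftBound cs (s - 1) + 1) s (by omega) (by omega) hlen, hgetD]
    · simp only [List.reverse_cons]
      rw [ih2]
      rw [PySem.List.pyRange_one_succ_right (by omega)]
  · have hE : pvExpandLeft cs s = ([], []) := by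
      rw [pvExpandLeft]; rw [dif_neg h]
    have hB : pvLeftBound cs s = s := by
      rw [pvLeftBound]; rw [dif_neg h]
    rw [hE, hB]
    constructor
    · simp [slice_self']
    · simp [PySem.List.pyRange_one_eq_nil (by omega : s + 1 ≤ s + 1)]
termination_by (s + 1).toNat
decreasing_by omega

-- clampIdx is monotone in the index on nonnegative indices
theorem clampIdx_mono (n : Nat) (a b : Int) (ha : 0 ≤ a) (h : a ≤ b) :
    PySem.List.clampIdx n a ≤ PySem.List.clampIdx n b := by
  simp only [PySem.List.clampIdx, Nat.min_def]
  split_ifs <;> omega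

theorem take_drop_append (xs : List Char) (ca cm cb : Nat) (h1 : ca ≤ cm) (h2 : cm ≤ cb) :
    (xs.drop ca).take (cm - ca) ++ (xs.drop cm).take (cb - cm) = (xs.drop ca).take (cb - ca) := by
  rw [show cb - ca = (cm - ca) + (cb - cm) by omega, List.take_add]
  congr 1
  rw [List.drop_drop, show ca + (cm - ca) = cm by omega]

-- glueing two adjacent slices (nonnegative start)
theorem slice_append (cs : List Char) (a m b : Int) (ha : 0 ≤ a) (h1 : a ≤ m) (h2 : m ≤ b) :
    PySem.List.slice cs (some a) (some m) ++ PySem.List.slice cs (some m) (some b) =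
      PySem.List.slice cs (some a) (some b) := by
  have e : ∀ (x y : Int), PySem.List.slice cs (some x) (some y) =
      (cs.drop (PySem.List.clampIdx cs.length x)).take
        (PySem.List.clampIdx cs.length y - PySem.List.clampIdx cs.length x) := by
    intro x y; simp [PySem.List.slice]
  rw [e, e, e]
  exact take_drop_append cs _ _ _ (clampIdx_mono cs.length a m ha h1)
    (clampIdx_mono cs.length m b (by omega) h2)

theorem find_number_and_y_indices_correct (line : String) (y : Int) :
    find_number_and_y_indices line y = find_number_and_y_indices_alt line y := by
  unfold find_number_and_y_indices find_number_and_y_indices_alt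
  simp only
  set cs := line.toList
  by_cases hy : -1 ≤ y
  · have hL := expandLeft_spec cs y hy
    have hR := expandRight_spec cs (y + 1)
    have hle := pvLeftBound_le cs y
    have hgeb := pvLeftBound_ge cs y hy
    have hge := pvRightBound_ge cs (y + 1)
    rw [hL.1, hL.2, hR]
    simp only
    rw [slice_append cs _ (y + 1) _ (by omega) (by omega) (by omega)]
    rw [← PySem.List.pyRange_one_append _ (y + 1) _ (by omega) (by omega)]
  · -- y ≤ -2: every loop guard is false immediately on both sides
    have hA1 : pvExpandLeft cs y = ([], []) := by
      rw [pvExpandLeft]; rw [dif_neg (by omega)]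
    have hA2 : pvExpandRight cs (y + 1) = ([], []) := by
      rw [pvExpandRight]; rw [dif_neg (by omega)]
    have hB1 : pvLeftBound cs y = y := by
      rw [pvLeftBound]; rw [dif_neg (by omega)]
    have hB2 : pvRightBound cs (y + 1) = y + 1 := by
      rw [pvRightBound]; rw [dif_neg (by omega)]
    rw [hA1, hA2, hB1, hB2]
    simp [slice_self', PySem.List.pyRange_one_eq_nil (le_refl (y + 1))]

-- ===== VERDICT (by name: the statement is the Claim_ definition above) =====
theorem find_number_and_y_indices_spec : Claim_equal_find_number_and_y_indices := by
  intro line y _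
  exact find_number_and_y_indices_correct line y
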